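-- pv_equiv track=rewrite | github.com/zjarci/kicad_Gen_Manufacture_Docs | kisexp.py | normalData
-- ===== SOURCE A (Python) =====
-- BRACKETS = {'(': ')'}
--
-- BRACKETS_END = {')':1}
--
-- SPACE = {' ':1, '\t':1, '\r':1, '\n':1}
--
-- def normalData(content, index):
--     data = ""
--     c_len = len(content)
--     while index < c_len:
--         c = content[index]
--         if c in SPACE:
--             index +=1
--             break
--         elif c in BRACKETS:
--             break
--         elif c in BRACKETS_END:
--             break
--         else:
--             data += c
--             index+=1
--     return data, index
-- ===== SOURCE B (Python) =====
-- # B: find the first delimiter position with str.find + min, then slice the token out,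
-- # instead of accumulating the token one character at a time.
-- DELIMS = ' \t\r\n()'
-- SPACE = ' \t\r\n'
--
-- def normalData(content, index):
--     if index >= len(content):
--         return "", index
--     start = max(index, 0)
--     tail = content[start:]
--     n = len(tail)
--     end = min((p for p in (tail.find(d) for d in DELIMS) if p >= 0), default=n)
--     data = tail[:end]
--     i = start + end
--     if end < n and tail[end] in SPACE:
--         return data, i + 1
--     return data, i
-- ===== Notes on version B (the rewrite author's own statement) =====
-- stated objective: alternative
-- what changed: B locates the first delimiter with str.find over each delimiter plus min (then slices the token out in one step) instead of A's character-by-character accumulation loop; B also treats a negative start index as position 0 rather than reading through Python's negative-index wraparound.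
-- intended difference: For in-range negative index (-len(content) <= index < 0) A reads characters through Python's negative-index wraparound and can even return a negative index (e.g. A('ab',-1) = ('bab',2)), an artefact of its implementation; B treats the position as clamped to the string start and returns ('ab',2), the intended token there (D_ omits the coincidence index = -1 with trailing whitespace and leading bracket, where both return ('',0)). — e.g. on normalData("ab", -1): A returns ("bab", 2), B returns ("ab", 2)
import Mathlib
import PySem

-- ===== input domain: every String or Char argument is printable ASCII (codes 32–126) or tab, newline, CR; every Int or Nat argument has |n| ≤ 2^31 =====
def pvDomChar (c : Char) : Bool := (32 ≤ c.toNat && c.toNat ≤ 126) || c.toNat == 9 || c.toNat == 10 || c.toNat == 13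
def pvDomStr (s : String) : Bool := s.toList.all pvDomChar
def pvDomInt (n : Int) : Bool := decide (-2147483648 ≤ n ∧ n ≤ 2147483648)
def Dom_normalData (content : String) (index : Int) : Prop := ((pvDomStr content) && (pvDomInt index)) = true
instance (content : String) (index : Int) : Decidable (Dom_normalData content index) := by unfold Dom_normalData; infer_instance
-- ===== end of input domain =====

-- B locates the first delimiter with str.find per delimiter + min and slices the token out in one
-- step, instead of A's character-by-character accumulation loop (alternative decomposition, same cost).

-- ===== PORT A =====
def isSpaceC (c : Char) : Bool := c == ' ' || c == '\t' || c == '\r' || c == '\n'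

def normalDataLoop (cs : List Char) (index : Int) (data : List Char) : List Char × Int :=
  if index < (cs.length : Int) then
    match PySem.List.pyGet? cs index with
    | some c =>
      if isSpaceC c then (data, index + 1)
      else if c == '(' then (data, index)
      else if c == ')' then (data, index)
      else normalDataLoop cs (index + 1) (data ++ [c])
    | none => (data, index)  -- content[index] raises IndexError here (excluded by Pre_)
  else (data, index)
termination_by ((cs.length : Int) - index).toNat
decreasing_by omega

def normalData (content : String) (index : Int) : String × Int :=
  let r := normalDataLoop content.toList index []
  (String.ofList r.1, r.2)

-- ===== PORT B =====
def pvDelims : List Char := [' ', '\t', '\r', '\n', '(', ')']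

def normalData_alt (content : String) (index : Int) : String × Int :=
  let cs := content.toList
  if (cs.length : Int) ≤ index then ("", index)
  else
    let start := (max index 0).toNat                 -- max(index, 0); re-positions a negative start at 0
    let tail := cs.drop start                        -- content[start:] with 0 ≤ start: exact
    let n := tail.length
    -- min((p for p in (tail.find(d) for d in DELIMS) if p >= 0), default=n)
    let ps := (pvDelims.map (fun d => PySem.Chars.find tail [d])).filter (fun p => decide (0 ≤ p))
    let e := PySem.List.minD ps id (n : Int)
    let data := tail.take e.toNat                    -- tail[:end] with 0 ≤ end: exact
    let i : Int := (start : Int) + e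
    if e < (n : Int) ∧ isSpaceC (tail.getD e.toNat ' ') then (String.ofList data, i + 1)
    else (String.ofList data, i)

-- ===== PRECONDITION & SPEC =====
-- Pre_ excludes exactly index < -len(content), where A's content[index] raises IndexError.
def Pre_normalData (content : String) (index : Int) : Prop :=
  -(content.toList.length : Int) ≤ index
instance (content : String) (index : Int) : Decidable (Pre_normalData content index) := by
  unfold Pre_normalData; infer_instance

def pvWitness_normalData : String × Int := ("ab cd", 0)

-- For in-range negative index (-len(content) ≤ index < 0) A reads characters through Python's
-- negative-index wraparound and can even return a negative index (e.g. A "ab" (-1) = ("bab", 2)),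
-- an artefact of its implementation; B treats the position as clamped to the string start and
-- returns ("ab", 2) there, the intended token at that position (D_ omits the coincidence
-- index = -1 with a trailing whitespace and a leading bracket, where both return ("", 0)).
def D_normalData (content : String) (index : Int) : Prop :=
  -(content.toList.length : Int) ≤ index ∧ index < 0 ∧
  ¬ (index = -1 ∧ isSpaceC (content.toList.getD (content.toList.length - 1) ' ') = true ∧
     (content.toList.getD 0 ' ' == '(' || content.toList.getD 0 ' ' == ')') = true)
instance (content : String) (index : Int) : Decidable (D_normalData content index) := by
  unfold D_normalData; infer_instance

def Spec_normalData (content : String) (index : Int) (out : String × Int) : Prop :=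
  ¬ D_normalData content index → out = normalData_alt content index
instance (content : String) (index : Int) (out : String × Int) : Decidable (Spec_normalData content index out) := by
  unfold Spec_normalData; infer_instance

def pvDiffWitness_normalData : String × Int := ("ab", -1)
def pvDiffWitnessOut_normalData : (String × Int) × (String × Int) := (("bab", 2), ("ab", 2))

-- ===== CLAIM (what is proved, stated in full; the proofs are below) =====
def Claim_unchanged_normalData : Prop := ∀ (content : String) (index : Int), Dom_normalData content index → Pre_normalData content index → Spec_normalData content index (normalData content index)
def Claim_changed_normalData : Prop := Dom_normalData (pvDiffWitness_normalData.1) (pvDiffWitness_normalData.2) ∧ Pre_normalData (pvDiffWitness_normalData.1) (pvDiffWitness_normalData.2) ∧ D_normalData (pvDiffWitness_normalData.1) (pvDiffWitness_normalData.2) ∧ normalData (pvDiffWitness_normalData.1) (pvDiffWitness_normalData.2) = pvDiffWitnessOut_normalData.1 ∧ normalData_alt (pvDiffWitness_normalData.1) (pvDiffWitness_normalData.2) = pvDiffWitnessOut_normalData.2 ∧ pvDiffWitnessOut_normalData.1 ≠ pvDiffWitnessOut_normalData.2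
def Claim_exact_normalData : Prop := ∀ (content : String) (index : Int), Dom_normalData content index → Pre_normalData content index → D_normalData content index → normalData content index ≠ normalData_alt content index

-- ===== LEMMAS AND PROOFS =====

def isDelimC (c : Char) : Bool := isSpaceC c || c == '(' || c == ')'

-- closed form shared by both ports on a non-negative start position s
def pvFinish (cs : List Char) (s : Nat) : List Char × Int :=
  let t := (cs.drop s).takeWhile (fun c => !isDelimC c)
  let e := s + t.length
  if e < cs.length ∧ isSpaceC (cs.getD e ' ') then (t, (e : Int) + 1) else (t, (e : Int))

lemma loopA_spec_aux : ∀ (k : Nat) (cs : List Char) (s : Nat) (data : List Char),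
    cs.length ≤ s + k →
    normalDataLoop cs (s : Int) data = (data ++ (pvFinish cs s).1, (pvFinish cs s).2) := by
  intro k
  induction k with
  | zero =>
    intro cs s data h
    simp only [Nat.add_zero] at h
    rw [normalDataLoop, pvFinish]
    have hnl : ¬ ((s : Int) < (cs.length : Int)) := by omega
    rw [if_neg hnl]
    simp [List.drop_eq_nil_of_le h, Nat.not_lt.mpr h]
  | succ k ih =>
    intro cs s data h
    by_cases hs : s < cs.length
    · rw [normalDataLoop]
      have hlt : (s : Int) < (cs.length : Int) := by exact_mod_cast hs
      rw [if_pos hlt, PySem.List.pyGet?_natCast, List.getElem?_eq_getElem hs]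
      have hdrop : cs.drop s = cs[s] :: cs.drop (s + 1) := List.drop_eq_getElem_cons hs
      by_cases hsp : isSpaceC cs[s]
      · have ht : (cs.drop s).takeWhile (fun c => !isDelimC c) = [] := by
          rw [hdrop, List.takeWhile_cons]; simp [isDelimC, hsp]
        rw [pvFinish]
        simp [hsp, ht, hs, List.getD_eq_getElem?_getD]
      · by_cases hob : cs[s] == '('
        · have ht : (cs.drop s).takeWhile (fun c => !isDelimC c) = [] := by
            rw [hdrop, List.takeWhile_cons]; simp [isDelimC, eq_of_beq hob]
          rw [pvFinish]
          simp [hsp, hob, ht, hs, List.getD_eq_getElem?_getD]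
        · by_cases hcb : cs[s] == ')'
          · have ht : (cs.drop s).takeWhile (fun c => !isDelimC c) = [] := by
              rw [hdrop, List.takeWhile_cons]; simp [isDelimC, eq_of_beq hcb]
            rw [pvFinish]
            simp [hsp, hob, hcb, ht, hs, List.getD_eq_getElem?_getD]
          · have hred : (match some cs[s] with
                | some c =>
                  if isSpaceC c = true then (data, (s : Int) + 1)
                  else
                    if (c == '(') = true then (data, (s : Int))
                    else if (c == ')') = true then (data, (s : Int))
                    else normalDataLoop cs ((s : Int) + 1) (data ++ [c])
                | none => (data, (s : Int)))
                = normalDataLoop cs ((s : Int) + 1) (data ++ [cs[s]]) := by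
              simp [hsp, hob, hcb]
            rw [hred]
            have hcast : (s : Int) + 1 = ((s + 1 : Nat) : Int) := by push_cast; ring
            rw [hcast, ih cs (s + 1) (data ++ [cs[s]]) (by omega)]
            have ht : (cs.drop s).takeWhile (fun c => !isDelimC c)
                = cs[s] :: (cs.drop (s + 1)).takeWhile (fun c => !isDelimC c) := by
              rw [hdrop, List.takeWhile_cons]; simp [isDelimC, hsp, hob, hcb]
            rw [pvFinish, pvFinish]
            simp only [ht, List.length_cons]
            have harith : s + 1 + ((cs.drop (s+1)).takeWhile (fun c => !isDelimC c)).length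
                 = s + (((cs.drop (s+1)).takeWhile (fun c => !isDelimC c)).length + 1) := by omega
            rw [harith]
            split_ifs with hc <;> simp
    · rw [normalDataLoop, pvFinish]
      have hnl : ¬ ((s : Int) < (cs.length : Int)) := by omega
      rw [if_neg hnl]
      simp [List.drop_eq_nil_of_le (Nat.le_of_not_lt hs), Nat.not_lt.mpr (Nat.le_of_not_lt hs)]
lemma foldl_min_isSome {α κ : Type} [LT κ] [DecidableLT κ] (key : α → κ) (xs : List α) : ∀ (a : α),
    (List.foldl (fun acc x => match acc with
      | none => some x
      | some m => if key x < key m then some x else some m) (some a) xs).isSome := by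
  induction xs with
  | nil => intro a; rfl
  | cons x xs ih =>
    intro a
    simp only [List.foldl_cons]
    show (List.foldl _ (if key x < key a then some x else some a) xs).isSome
    split_ifs <;> exact ih _

lemma min?_isSome_of_ne_nil {α κ : Type} [LT κ] [DecidableLT κ] (key : α → κ) (xs : List α)
    (h : xs ≠ []) : (PySem.List.min? xs key).isSome := by
  cases xs with
  | nil => exact absurd rfl h
  | cons x xs =>
    show (List.foldl _ (some x) xs).isSome
    exact foldl_min_isSome key xs x

lemma minD_eq_of_min (ps : List Int) (t d : Int) (ht : t ∈ ps) (hall : ∀ p ∈ ps, t ≤ p) :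
    PySem.List.minD ps id d = t := by
  have hne : ps ≠ [] := List.ne_nil_of_mem ht
  obtain ⟨m, hm⟩ := Option.isSome_iff_exists.mp (min?_isSome_of_ne_nil id ps hne)
  have h2 := PySem.List.min?_isMin hm t ht
  have : m = t := le_antisymm h2 (hall m (PySem.List.min?_mem hm))
  simp [PySem.List.minD, hm, this]

lemma sing_prefix_iff (d : Char) (l : List Char) : [d] <+: l ↔ l.head? = some d := by
  cases l with
  | nil => simp
  | cons x xs => simp [List.cons_prefix_iff]

lemma mem_pvDelims_iff (c : Char) : c ∈ pvDelims ↔ isDelimC c = true := by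
  simp only [pvDelims, isDelimC, isSpaceC, List.mem_cons, List.not_mem_nil, or_false,
    Bool.or_eq_true, beq_iff_eq]
  tauto

lemma takeWhile_getElem_delim (l : List Char) (j : Nat) (hj : j < (l.takeWhile (fun c => !isDelimC c)).length)
    (hjl : j < l.length) : isDelimC l[j] = false := by
  have hpre := List.takeWhile_prefix (l := l) (p := fun c => !isDelimC c)
  have hget : (l.takeWhile (fun c => !isDelimC c))[j] = l[j] := hpre.getElem hj
  have hmem : (l.takeWhile (fun c => !isDelimC c))[j] ∈ l.takeWhile (fun c => !isDelimC c) :=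
    List.getElem_mem hj
  have := List.mem_takeWhile_imp hmem
  rw [hget] at this
  simpa using this

lemma takeWhile_stop (l : List Char) (p : Char → Bool) (h : (l.takeWhile p).length < l.length) :
    p l[(l.takeWhile p).length] = false := by
  have hsplit := List.takeWhile_append_dropWhile (p := p) (l := l)
  have hlen : (l.takeWhile p).length + (l.dropWhile p).length = l.length := by
    conv_rhs => rw [← hsplit]
    rw [List.length_append]
  have hpos : 0 < (l.dropWhile p).length := by omega
  have hnot := List.dropWhile_get_zero_not (p := p) l hpos
  have hg : l[(l.takeWhile p).length]'h = (l.dropWhile p).get ⟨0, hpos⟩ := by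
    rw [List.getElem_of_eq hsplit.symm h, List.getElem_append_right (le_refl _)]
    simp
  rw [hg]
  simpa using hnot

lemma takeWhile_stop_delim (l : List Char) (h : (l.takeWhile (fun c => !isDelimC c)).length < l.length) :
    isDelimC l[(l.takeWhile (fun c => !isDelimC c)).length] = true := by
  have := takeWhile_stop l (fun c => !isDelimC c) h
  simpa using this

lemma minFind_eq (tail : List Char) :
    PySem.List.minD
      ((pvDelims.map (fun d => PySem.Chars.find tail [d])).filter (fun p => decide (0 ≤ p)))
      id (tail.length : Int)
    = ((tail.takeWhile (fun c => !isDelimC c)).length : Int) := by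
  set t := (tail.takeWhile (fun c => !isDelimC c)).length with htdef
  set ps := (pvDelims.map (fun d => PySem.Chars.find tail [d])).filter (fun p => decide (0 ≤ p)) with hpsdef
  have htle : t ≤ tail.length := (List.takeWhile_prefix _).length_le
  have hall : ∀ x ∈ ps, (t : Int) ≤ x := by
    intro x hx
    rw [hpsdef, List.mem_filter] at hx
    obtain ⟨hxm, hx0b⟩ := hx
    have hx0 : (0 : Int) ≤ x := by simpa using hx0b
    obtain ⟨d, hd, rfl⟩ := List.mem_map.mp hxm
    have hspec := PySem.Chars.find_spec (s := tail) (sub := [d]) hx0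
    by_contra hlt
    push Not at hlt
    have hfn : (PySem.Chars.find tail [d]).toNat < t := by omega
    have hfl : (PySem.Chars.find tail [d]).toNat < tail.length := by omega
    have hhead : (tail.drop (PySem.Chars.find tail [d]).toNat).head? = some d :=
      (sing_prefix_iff _ _).mp hspec.1
    rw [List.head?_drop] at hhead
    have heq : tail[(PySem.Chars.find tail [d]).toNat] = d := by
      simpa [List.getElem?_eq_getElem hfl] using hhead
    have hdelim : isDelimC tail[(PySem.Chars.find tail [d]).toNat] = false :=
      takeWhile_getElem_delim tail _ (by omega) hfl
    rw [heq, (mem_pvDelims_iff d).mp hd] at hdelim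
    cases hdelim
  by_cases ht : t < tail.length
  · have hdelim := takeWhile_stop_delim tail ht
    have hd0mem : tail[t] ∈ pvDelims := (mem_pvDelims_iff _).mpr hdelim
    have hpre : [tail[t]] <+: tail.drop t := by
      rw [sing_prefix_iff, List.head?_drop, List.getElem?_eq_getElem ht]
    have hinf : [tail[t]] <:+: tail := hpre.isInfix.trans (List.drop_suffix t tail).isInfix
    have hf0 : (0 : Int) ≤ PySem.Chars.find tail [tail[t]] :=
      (PySem.Chars.find_nonneg_iff tail [tail[t]]).mpr hinf
    have hspec := PySem.Chars.find_spec hf0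
    have hle : (PySem.Chars.find tail [tail[t]]).toNat ≤ t := by
      by_contra hgt
      push Not at hgt
      exact hspec.2 t hgt hpre
    have hmemmap : PySem.Chars.find tail [tail[t]] ∈ pvDelims.map (fun d => PySem.Chars.find tail [d]) :=
      List.mem_map.mpr ⟨tail[t], hd0mem, rfl⟩
    have hmemf : PySem.Chars.find tail [tail[t]] ∈ ps := by
      rw [hpsdef, List.mem_filter]
      exact ⟨hmemmap, by simpa using hf0⟩
    have hge := hall _ hmemf
    have hfeq : PySem.Chars.find tail [tail[t]] = (t : Int) := by omega
    rw [hfeq] at hmemf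
    exact minD_eq_of_min ps (t : Int) (tail.length : Int) hmemf hall
  · have hteq : t = tail.length := by omega
    have hnil : ps = [] := by
      rw [hpsdef, List.filter_eq_nil_iff]
      intro x hxm
      simp only [decide_eq_true_eq, not_le]
      by_contra hx0'
      push Not at hx0'
      have hmemf : x ∈ ps := by
        rw [hpsdef, List.mem_filter]
        exact ⟨hxm, by simpa using hx0'⟩
      have hge := hall _ hmemf
      have hle' : x ≤ (tail.length : Int) := by
        obtain ⟨d, hd, rfl⟩ := List.mem_map.mp hxm
        exact PySem.Chars.find_le_length tail [d]
      have hxeq : x.toNat = tail.length := by omega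
      obtain ⟨d, hd, rfl⟩ := List.mem_map.mp hxm
      have hspec := PySem.Chars.find_spec (s := tail) (sub := [d]) hx0'
      have hpre := hspec.1
      rw [hxeq, List.drop_length] at hpre
      simp at hpre
    rw [hnil, PySem.List.minD_nil, hteq]

-- ===== VERDICT (by name: the statement is the Claim_ definition above) =====
lemma pvFinish_snd_nonneg (cs : List Char) (s : Nat) : 0 ≤ (pvFinish cs s).2 := by
  rw [pvFinish]
  split_ifs <;> positivity

lemma pvEqNonneg (content : String) (s : Nat) :
    normalData content (s : Int) = normalData_alt content (s : Int) := by
  unfold normalData normalData_alt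
  rw [loopA_spec_aux content.toList.length content.toList s [] (by omega)]
  by_cases hcase : (content.toList.length : Int) ≤ (s : Int)
  · have hsl : content.toList.length ≤ s := by exact_mod_cast hcase
    rw [if_pos hcase, pvFinish]
    have hdrop : content.toList.drop s = [] := List.drop_eq_nil_of_le hsl
    rw [hdrop]
    simp only [List.takeWhile_nil, List.length_nil, Nat.add_zero]
    rw [if_neg (fun hc => absurd hc.1 (Nat.not_lt.mpr hsl))]
    simp
  · have hsl : s < content.toList.length := by
      have : ¬ content.toList.length ≤ s := fun h => hcase (by exact_mod_cast h)
      omega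
    rw [if_neg hcase]
    have hmax : ((max (s : Int) 0).toNat) = s := by
      rw [max_eq_left (by positivity : (0:Int) ≤ (s : Int))]
      exact Int.toNat_natCast s
    simp only [hmax]
    rw [minFind_eq (content.toList.drop s)]
    set t := ((content.toList.drop s).takeWhile (fun c => !isDelimC c)).length with htdef
    have htake : (content.toList.drop s).take ((t : Int)).toNat
        = (content.toList.drop s).takeWhile (fun c => !isDelimC c) := by
      rw [Int.toNat_natCast, htdef]
      exact ((List.prefix_iff_eq_take).mp (List.takeWhile_prefix _)).symm
    have hgd : (content.toList.drop s).getD ((t : Int)).toNat ' '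
        = content.toList.getD (s + t) ' ' := by
      rw [Int.toNat_natCast]
      simp [List.getD_eq_getElem?_getD, List.getElem?_drop]
    have hlen : (content.toList.drop s).length = content.toList.length - s := List.length_drop
    have hcond : ((t : Int) < (((content.toList.drop s).length : Nat) : Int)
          ∧ isSpaceC ((content.toList.drop s).getD ((t : Int)).toNat ' ') = true)
        ↔ (s + t < content.toList.length
          ∧ isSpaceC (content.toList.getD (s + t) ' ') = true) := by
      rw [hgd, hlen]
      constructor
      · intro ⟨h1, h2⟩
        have : t < content.toList.length - s := by exact_mod_cast h1
        exact ⟨by omega, h2⟩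
      · intro ⟨h1, h2⟩
        exact ⟨by exact_mod_cast (by omega : t < content.toList.length - s), h2⟩
    rw [pvFinish]
    simp only [htake]
    split_ifs with hA hB hB
    · simp only [Prod.mk.injEq]
      constructor
      · simp
      · push_cast
        omega
    · exact absurd (hcond.mpr hA) hB
    · exact absurd (hcond.mp hB) hA
    · simp only [Prod.mk.injEq]
      constructor
      · simp
      · push_cast
        omega


lemma pyGet?_neg (cs : List Char) (m : Nat) (h1 : 0 < m) (h2 : m ≤ cs.length) :
    PySem.List.pyGet? cs (-(m : Int)) = cs[cs.length - m]? := by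
  have hc1 : ¬ (0 ≤ -(m : Int)) := by omega
  have hc2 : -(cs.length : Int) ≤ -(m : Int) := by omega
  simp only [PySem.List.pyGet?, PySem.List.pyIdx?, hc1, if_false, hc2, if_true]
  simp

def pvNegFinish (cs : List Char) (m : Nat) (data : List Char) : List Char × Int :=
  let suf := cs.drop (cs.length - m)
  let T := suf.takeWhile (fun c => !isDelimC c)
  if T.length = m then normalDataLoop cs 0 (data ++ suf)
  else if isSpaceC (suf.getD T.length ' ') then (data ++ T, ((T.length + 1 : Nat) : Int) - m)
  else (data ++ T, ((T.length : Nat) : Int) - m)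

lemma loopA_neg_spec (cs : List Char) : ∀ (m : Nat), 0 < m → m ≤ cs.length → ∀ (data : List Char),
    normalDataLoop cs (-(m : Int)) data = pvNegFinish cs m data := by
  intro m
  induction m with
  | zero => intro h; omega
  | succ k ih =>
    intro _ hle data
    have hj : cs.length - (k + 1) < cs.length := by omega
    have hneg : (-(((k : Nat) + 1 : Nat) : Int)) < (cs.length : Int) := by push_cast; omega
    rw [normalDataLoop, if_pos hneg, pyGet?_neg cs (k + 1) (by omega) hle,
      List.getElem?_eq_getElem hj]
    have hdropj : cs.drop (cs.length - (k + 1)) = cs[cs.length - (k + 1)] :: cs.drop (cs.length - (k + 1) + 1) :=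
      List.drop_eq_getElem_cons hj
    by_cases hsp : isSpaceC cs[cs.length - (k + 1)]
    · have hT : (cs.drop (cs.length - (k + 1))).takeWhile (fun c => !isDelimC c) = [] := by
        rw [hdropj, List.takeWhile_cons]
        simp [isDelimC, hsp]
      have hred : (match some cs[cs.length - (k + 1)] with
            | some c =>
              if isSpaceC c = true then (data, (-(((k : Nat) + 1 : Nat) : Int)) + 1)
              else
                if (c == '(') = true then (data, (-(((k : Nat) + 1 : Nat) : Int)))
                else if (c == ')') = true then (data, (-(((k : Nat) + 1 : Nat) : Int)))
                else normalDataLoop cs ((-(((k : Nat) + 1 : Nat) : Int)) + 1) (data ++ [c])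
            | none => (data, (-(((k : Nat) + 1 : Nat) : Int))))
          = (data, (-(((k : Nat) + 1 : Nat) : Int)) + 1) := by
        simp [hsp]
      rw [hred, pvNegFinish]
      simp only [hT, List.length_nil]
      rw [if_neg (by omega), hdropj]
      have hgd : (cs[cs.length - (k + 1)] :: cs.drop (cs.length - (k + 1) + 1)).getD 0 ' '
          = cs[cs.length - (k + 1)] := rfl
      rw [hgd, if_pos hsp]
      simp only [List.append_nil, Prod.mk.injEq, true_and]
      push_cast
      ring
    · by_cases hob : cs[cs.length - (k + 1)] == '('
      · have hT : (cs.drop (cs.length - (k + 1))).takeWhile (fun c => !isDelimC c) = [] := by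
          rw [hdropj, List.takeWhile_cons]
          simp [isDelimC, eq_of_beq hob]
        have hred : (match some cs[cs.length - (k + 1)] with
              | some c =>
                if isSpaceC c = true then (data, (-(((k : Nat) + 1 : Nat) : Int)) + 1)
                else
                  if (c == '(') = true then (data, (-(((k : Nat) + 1 : Nat) : Int)))
                  else if (c == ')') = true then (data, (-(((k : Nat) + 1 : Nat) : Int)))
                  else normalDataLoop cs ((-(((k : Nat) + 1 : Nat) : Int)) + 1) (data ++ [c])
              | none => (data, (-(((k : Nat) + 1 : Nat) : Int))))
            = (data, (-(((k : Nat) + 1 : Nat) : Int))) := by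
          simp [hsp, hob]
        rw [hred, pvNegFinish]
        simp only [hT, List.length_nil]
        rw [if_neg (by omega), hdropj]
        have hgd : (cs[cs.length - (k + 1)] :: cs.drop (cs.length - (k + 1) + 1)).getD 0 ' '
            = cs[cs.length - (k + 1)] := rfl
        rw [hgd, if_neg (by simp [hsp])]
        simp
      · by_cases hcb : cs[cs.length - (k + 1)] == ')'
        · have hT : (cs.drop (cs.length - (k + 1))).takeWhile (fun c => !isDelimC c) = [] := by
            rw [hdropj, List.takeWhile_cons]
            simp [isDelimC, eq_of_beq hcb]
          have hred : (match some cs[cs.length - (k + 1)] with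
                | some c =>
                  if isSpaceC c = true then (data, (-(((k : Nat) + 1 : Nat) : Int)) + 1)
                  else
                    if (c == '(') = true then (data, (-(((k : Nat) + 1 : Nat) : Int)))
                    else if (c == ')') = true then (data, (-(((k : Nat) + 1 : Nat) : Int)))
                    else normalDataLoop cs ((-(((k : Nat) + 1 : Nat) : Int)) + 1) (data ++ [c])
                | none => (data, (-(((k : Nat) + 1 : Nat) : Int))))
              = (data, (-(((k : Nat) + 1 : Nat) : Int))) := by
            simp [hsp, hob, hcb]
          rw [hred, pvNegFinish]
          simp only [hT, List.length_nil]
          rw [if_neg (by omega), hdropj]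
          have hgd : (cs[cs.length - (k + 1)] :: cs.drop (cs.length - (k + 1) + 1)).getD 0 ' '
              = cs[cs.length - (k + 1)] := rfl
          rw [hgd, if_neg (by simp [hsp])]
          simp
        · have hred : (match some cs[cs.length - (k + 1)] with
                | some c =>
                  if isSpaceC c = true then (data, (-(((k : Nat) + 1 : Nat) : Int)) + 1)
                  else
                    if (c == '(') = true then (data, (-(((k : Nat) + 1 : Nat) : Int)))
                    else if (c == ')') = true then (data, (-(((k : Nat) + 1 : Nat) : Int)))
                    else normalDataLoop cs ((-(((k : Nat) + 1 : Nat) : Int)) + 1) (data ++ [c])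
                | none => (data, (-(((k : Nat) + 1 : Nat) : Int))))
              = normalDataLoop cs ((-(((k : Nat) + 1 : Nat) : Int)) + 1) (data ++ [cs[cs.length - (k + 1)]]) := by
            simp [hsp, hob, hcb]
          rw [hred]
          have hT : (cs.drop (cs.length - (k + 1))).takeWhile (fun c => !isDelimC c)
              = cs[cs.length - (k + 1)] :: (cs.drop (cs.length - (k + 1) + 1)).takeWhile (fun c => !isDelimC c) := by
            rw [hdropj, List.takeWhile_cons]
            simp [isDelimC, hsp, hob, hcb]
          by_cases hk : k = 0
          · subst hk
            have h0 : (-(((0 : Nat) + 1 : Nat) : Int)) + 1 = ((0 : Nat) : Int) := by norm_num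
            rw [h0, pvNegFinish]
            have hdrop1 : cs.drop (cs.length - (0 + 1) + 1) = [] := by
              apply List.drop_eq_nil_of_le
              omega
            simp only [hT, hdrop1, List.takeWhile_nil, List.length_cons, List.length_nil,
              Nat.zero_add, if_true]
            rw [hdropj, hdrop1]
            simp
          · have hstep : (-(((k : Nat) + 1 : Nat) : Int)) + 1 = -((k : Nat) : Int) := by push_cast; ring
            rw [hstep, ih (by omega) (by omega) (data ++ [cs[cs.length - (k + 1)]])]
            have hdropk : cs.drop (cs.length - (k + 1) + 1) = cs.drop (cs.length - k) := by
              congr 1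
              omega
            rw [pvNegFinish, pvNegFinish]
            simp only [← hdropk, hT, List.length_cons]
            have hcondIff : (((cs.drop (cs.length - (k + 1) + 1)).takeWhile (fun c => !isDelimC c)).length + 1 = k + 1)
                ↔ (((cs.drop (cs.length - (k + 1) + 1)).takeWhile (fun c => !isDelimC c)).length = k) := by
              omega
            rw [if_congr hcondIff rfl rfl]
            have hgd : (cs.drop (cs.length - (k + 1))).getD
                  (((cs.drop (cs.length - (k + 1) + 1)).takeWhile (fun c => !isDelimC c)).length + 1) ' '
                = (cs.drop (cs.length - (k + 1) + 1)).getD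
                  (((cs.drop (cs.length - (k + 1) + 1)).takeWhile (fun c => !isDelimC c)).length) ' ' := by
              rw [hdropj, List.getD_cons_succ]
            rw [hgd]
            split_ifs with h1 h2
            · rw [hdropj]
              simp
            · simp only [Prod.mk.injEq]
              exact ⟨by simp, by push_cast; ring⟩
            · simp only [Prod.mk.injEq]
              exact ⟨by simp, by push_cast; ring⟩

lemma alt_neg (content : String) (index : Int) (h : index < 0) (hL : 0 < content.toList.length) :
    normalData_alt content index = normalData_alt content 0 := by
  unfold normalData_alt
  have h1 : ¬ ((content.toList.length : Int) ≤ index) := by omega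
  have h2 : ¬ ((content.toList.length : Int) ≤ 0) := by omega
  rw [if_neg h1, if_neg h2, max_eq_right (le_of_lt h), max_self]

lemma eq_at_zero (content : String) : normalData content 0 = normalData_alt content 0 := by
  have := pvEqNonneg content 0
  simpa using this

lemma bracket_not_space (c : Char) (h : (c == '(' || c == ')') = true) : isSpaceC c = false := by
  rcases Bool.or_eq_true_iff.mp h with h' | h' <;> rw [eq_of_beq h'] <;> rfl

lemma get0_eq_getD (cs : List Char) (hl : 0 < cs.length) : cs.get ⟨0, hl⟩ = cs.getD 0 ' ' := by
  simp [List.getD_eq_getElem?_getD, List.getElem?_eq_getElem hl]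

lemma sufgd (cs : List Char) :
    (cs.drop (cs.length - 1)).getD 0 ' ' = cs.getD (cs.length - 1) ' ' := by
  simp only [List.getD_eq_getElem?_getD, List.getElem?_drop, Nat.add_zero]

lemma headDelim_of_bracket (c : Char) (h : (c == '(' || c == ')') = true) : isDelimC c = true := by
  rcases Bool.or_eq_true_iff.mp h with h' | h' <;> rw [eq_of_beq h'] <;> rfl

lemma lastTake_nil (cs : List Char)
    (hlast : isSpaceC (cs.getD (cs.length - 1) ' ') = true) :
    (cs.drop (cs.length - 1)).takeWhile (fun c => !isDelimC c) = [] := by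
  rw [List.takeWhile_eq_nil_iff]
  intro hl
  have hc : isDelimC ((cs.drop (cs.length - 1)).get ⟨0, hl⟩) = true := by
    rw [get0_eq_getD _ hl, sufgd cs]
    simp only [isDelimC, hlast, Bool.true_or]
  simp only [hc, Bool.not_true]
  simp

lemma headTake_nil (cs : List Char)
    (hhead : (cs.getD 0 ' ' == '(' || cs.getD 0 ' ' == ')') = true) :
    cs.takeWhile (fun c => !isDelimC c) = [] := by
  rw [List.takeWhile_eq_nil_iff]
  intro hl
  have hc : isDelimC (cs.get ⟨0, hl⟩) = true := by
    rw [get0_eq_getD _ hl]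
    exact headDelim_of_bracket _ hhead
  simp only [hc, Bool.not_true]
  simp

theorem normalData_spec : Claim_unchanged_normalData := by
  intro content index _hdom hpre hnd
  unfold Pre_normalData at hpre
  unfold D_normalData at hnd
  by_cases h0 : 0 ≤ index
  · obtain ⟨s, rfl⟩ : ∃ s : Nat, index = (s : Int) := ⟨index.toNat, (Int.toNat_of_nonneg h0).symm⟩
    exact pvEqNonneg content s
  · -- the coincidence corner: index = -1, trailing whitespace, leading bracket; both sides give ("", 0)
    push Not at h0 hnd
    obtain ⟨hm1, hlast, hhead⟩ := hnd hpre h0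
    subst hm1
    have hL : 0 < content.toList.length := by omega
    rw [alt_neg content (-1) (by omega) hL, ← eq_at_zero]
    unfold normalData
    have hone : (-1 : Int) = -((1 : Nat) : Int) := by norm_num
    have h00 : (0 : Int) = ((0 : Nat) : Int) := rfl
    rw [hone, loopA_neg_spec content.toList 1 (by omega) (by omega) [], h00,
      loopA_spec_aux content.toList.length content.toList 0 [] (by omega)]
    rw [pvNegFinish]
    simp only [lastTake_nil content.toList hlast, List.length_nil]
    rw [if_neg (by omega), sufgd content.toList, if_pos hlast, pvFinish]
    simp only [headTake_nil content.toList hhead, List.drop_zero, List.length_nil,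
      Nat.zero_add, Nat.add_zero]
    rw [if_neg ?hc]
    case hc =>
      intro hcnd
      have hspc := hcnd.2
      rw [bracket_not_space _ hhead] at hspc
      exact absurd hspc (by simp)
    simp

theorem normalData_changed : Claim_changed_normalData := by
  unfold Claim_changed_normalData
  refine ⟨by decide, by decide, by decide, ?_, by decide, by decide⟩
  show normalData "ab" (-1) = ("bab", 2)
  simp [normalData, normalDataLoop, PySem.List.pyGet?, PySem.List.pyIdx?, isSpaceC]

theorem normalData_tight : Claim_exact_normalData := by
  intro content index _hdom hpre hD heq
  unfold Pre_normalData at hpre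
  unfold D_normalData at hD
  obtain ⟨hge, hlt, hexc⟩ := hD
  have hL : 0 < content.toList.length := by omega
  obtain ⟨m, hm, hm1, hmL⟩ : ∃ m : Nat, index = -(m : Int) ∧ 0 < m ∧ m ≤ content.toList.length :=
    ⟨(-index).toNat, by omega, by omega, by omega⟩
  subst hm
  rw [alt_neg content _ (by omega) hL, ← eq_at_zero] at heq
  unfold normalData at heq
  have h00 : (0 : Int) = ((0 : Nat) : Int) := rfl
  rw [loopA_neg_spec content.toList m hm1 hmL [], h00,
    loopA_spec_aux content.toList.length content.toList 0 [] (by omega)] at heq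
  rw [pvNegFinish] at heq
  set suf := content.toList.drop (content.toList.length - m) with hsuf
  set T := suf.takeWhile (fun c => !isDelimC c) with hT
  have hsufLen : suf.length = m := by
    rw [hsuf, List.length_drop]
    omega
  have hTle : T.length ≤ m := by
    rw [← hsufLen]
    exact (List.takeWhile_prefix _).length_le
  have hE0 := pvFinish_snd_nonneg content.toList 0
  by_cases hfall : T.length = m
  · rw [if_pos hfall, h00,
      loopA_spec_aux content.toList.length content.toList 0 ([] ++ suf) (by omega)] at heq
    rw [Prod.mk.injEq] at heq
    have hlen := congrArg (fun str => str.toList.length) heq.1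
    simp at hlen
    rw [hlen] at hsufLen
    simp at hsufLen
    omega
  · rw [if_neg hfall] at heq
    by_cases hsp : isSpaceC (suf.getD T.length ' ')
    · rw [if_pos hsp, Prod.mk.injEq] at heq
      obtain ⟨hfst, hsnd⟩ := heq
      by_cases hm1' : T.length + 1 = m
      · -- A's index lands exactly on 0: this forces the excluded coincidence
        have hsnd0 : (pvFinish content.toList 0).2 = 0 := by omega
        have hfst' : T = (pvFinish content.toList 0).1 := by
          have := congrArg String.toList hfst
          simpa using this
        have hF1 : (pvFinish content.toList 0).1
            = (content.toList.drop 0).takeWhile (fun c => !isDelimC c) := by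
          rw [pvFinish]
          split_ifs <;> rfl
        rw [pvFinish] at hsnd0
        split_ifs at hsnd0 with hcnd
        · exfalso
          omega
        · -- then-branch impossible; here the token at 0 is empty and the head is no space
          have hT0nil : ((content.toList.drop 0).takeWhile (fun c => !isDelimC c)).length = 0 := by
            omega
          have hTnil : T = [] := by
            rw [hfst', hF1]
            exact List.length_eq_zero_iff.mp hT0nil
          have hmeq1 : m = 1 := by
            rw [hTnil] at hm1'
            simpa using hm1'.symm
          subst hmeq1
          apply hexc
          refine ⟨by norm_num, ?_, ?_⟩
          · rw [← sufgd content.toList]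
            rw [hTnil] at hsp
            simpa [hsuf] using hsp
          · push Not at hcnd
            have hnsp : isSpaceC (content.toList.getD (0 + ((content.toList.drop 0).takeWhile (fun c => !isDelimC c)).length) ' ') = false := by
              have := hcnd (by omega)
              simpa using this
            rw [hT0nil, Nat.add_zero] at hnsp
            have hdel : isDelimC (content.toList.getD 0 ' ') = true := by
              have h0l : (0 : Nat) < content.toList.length := hL
              have hnil : (content.toList.drop 0).takeWhile (fun c => !isDelimC c) = [] := by
                rw [hfst', hF1] at hTnil
                exact hTnil
              rw [List.drop_zero, List.takeWhile_eq_nil_iff] at hnil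
              have := hnil h0l
              rw [get0_eq_getD _ h0l] at this
              simpa using this
            rw [isDelimC, hnsp] at hdel
            simpa using hdel
      · -- A returns a strictly negative index, B a non-negative one
        omega
    · rw [if_neg hsp, Prod.mk.injEq] at heq
      obtain ⟨hfst, hsnd⟩ := heq
      have : T.length < m := by omega
      omega
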